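-- pv_equiv track=rewrite | github.com/AI1379/nahida-bot | nahida_bot/channels/telegram/markdown_converter.py | _convert_blockquotes
-- ===== SOURCE A (Python) =====
-- def _convert_blockquotes(text: str) -> str:
--     """Convert > quote lines to <blockquote>...</blockquote>."""
--     lines = text.split("\n")
--     result: list[str] = []
--     in_quote = False
--
--     for line in lines:
--         if line.startswith("&gt; "):
--             quote_content = line[5:]
--             if not in_quote:
--                 result.append("<blockquote>")
--                 in_quote = True
--             result.append(quote_content)
--         else:
--             if in_quote:
--                 result.append("</blockquote>")
--                 in_quote = False
--             result.append(line)
--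
--     if in_quote:
--         result.append("</blockquote>")
--
--     return "\n".join(result)
-- ===== SOURCE B (Python) =====
-- def _convert_blockquotes(text: str) -> str:
--     """Convert > quote lines to <blockquote>...</blockquote>."""
--     out: list[str] = []
--     rest = text.split("\n")
--     while rest:
--         if rest[0].startswith("&gt; "):
--             run: list[str] = []
--             while rest and rest[0].startswith("&gt; "):
--                 run.append(rest[0][5:])
--                 rest = rest[1:]
--             out.append("<blockquote>")
--             out.extend(run)
--             out.append("</blockquote>")
--         else:
--             out.append(rest[0])
--             rest = rest[1:]
--     return "\n".join(out)
-- ===== Notes on version B (the rewrite author's own statement) =====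
-- stated objective: alternative
-- what changed: Replaces the stateful single pass carrying an in_quote flag (with a post-loop close) by a run-based consumer: an outer loop over the remaining lines that, upon meeting a quote line, consumes the whole maximal run of quote lines at once and wraps it in one blockquote, so no carried flag and no trailing cleanup exist.
import Mathlib
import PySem

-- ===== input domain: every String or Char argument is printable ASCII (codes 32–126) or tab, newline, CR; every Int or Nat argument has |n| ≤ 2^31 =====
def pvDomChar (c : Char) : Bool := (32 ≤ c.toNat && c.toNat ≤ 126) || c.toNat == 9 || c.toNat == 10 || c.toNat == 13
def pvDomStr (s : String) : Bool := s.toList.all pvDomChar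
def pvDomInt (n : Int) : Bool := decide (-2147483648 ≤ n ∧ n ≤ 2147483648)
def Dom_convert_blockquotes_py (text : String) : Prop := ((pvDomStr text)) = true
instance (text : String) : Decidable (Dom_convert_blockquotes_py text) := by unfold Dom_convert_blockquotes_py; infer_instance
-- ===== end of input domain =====

-- B replaces A's carried in_quote flag and post-loop close with a run-based consumer
-- that wraps each maximal run of quote lines at once (alternative decomposition, same cost).

-- ===== PORT A =====
-- one iteration of A's for-loop: state = (result, in_quote)
def pvStepA (st : List String × Bool) (line : String) : List String × Bool :=
  if PySem.Str.startswith line "&gt; " then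
    let quote_content := PySem.Str.slice line (some 5) none
    if st.2 = false then (st.1 ++ ["<blockquote>", quote_content], true)
    else (st.1 ++ [quote_content], true)
  else
    if st.2 = true then (st.1 ++ ["</blockquote>", line], false)
    else (st.1 ++ [line], false)

def convert_blockquotes_py (text : String) : String :=
  let lines := (PySem.Str.split? text "\n").getD []
  let st := lines.foldl pvStepA ([], false)
  let result := if st.2 = true then st.1 ++ ["</blockquote>"] else st.1
  PySem.Str.join "\n" result

-- ===== PORT B =====
def pvAltIsQ (line : String) : Bool := PySem.Str.startswith line "&gt; "
def pvAltDrop5 (line : String) : String := PySem.Str.slice line (some 5) none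

-- B's outer while-loop over the remaining lines; the inner while that consumes a
-- maximal run of quote lines is takeWhile/dropWhile
def pvAltGo (ls : List String) : List String :=
  match ls with
  | [] => []
  | l :: rest =>
    if pvAltIsQ l then
      "<blockquote>" :: ((l :: rest).takeWhile pvAltIsQ).map pvAltDrop5
        ++ "</blockquote>" :: pvAltGo ((l :: rest).dropWhile pvAltIsQ)
    else l :: pvAltGo rest
termination_by ls.length
decreasing_by
  · simp only [List.dropWhile_cons, *, if_pos]
    exact Nat.lt_succ_of_le (List.length_dropWhile_le _ _)
  · simp

def convert_blockquotes_py_alt (text : String) : String :=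
  PySem.Str.join "\n" (pvAltGo ((PySem.Str.split? text "\n").getD []))

-- ===== PRECONDITION & SPEC =====
def Spec_convert_blockquotes_py (text : String) (out : String) : Prop := out = convert_blockquotes_py_alt text
instance (text : String) (out : String) : Decidable (Spec_convert_blockquotes_py text out) := by unfold Spec_convert_blockquotes_py; infer_instance

-- ===== CLAIM (what is proved, stated in full; the proofs are below) =====
def Claim_equal_convert_blockquotes_py : Prop := ∀ (text : String), Dom_convert_blockquotes_py text → Spec_convert_blockquotes_py text (convert_blockquotes_py text)

-- ===== LEMMAS AND PROOFS =====

-- recursive characterisation of the rest of A's output from loop state in_quote,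
-- including the post-loop close
def pvAGo : List String → Bool → List String
  | [], inq => if inq then ["</blockquote>"] else []
  | l :: ls, inq =>
    if pvAltIsQ l then
      (if inq then pvAltDrop5 l :: pvAGo ls true
       else "<blockquote>" :: pvAltDrop5 l :: pvAGo ls true)
    else
      (if inq then "</blockquote>" :: l :: pvAGo ls false
       else l :: pvAGo ls false)

lemma pvFoldlA (ls : List String) : ∀ (res : List String) (inq : Bool),
    (if (ls.foldl pvStepA (res, inq)).2 = true
     then (ls.foldl pvStepA (res, inq)).1 ++ ["</blockquote>"]
     else (ls.foldl pvStepA (res, inq)).1) = res ++ pvAGo ls inq := by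
  induction ls with
  | nil => intro res inq; cases inq <;> simp [pvAGo]
  | cons l ls ih =>
    intro res inq
    by_cases hq : PySem.Str.startswith l "&gt; " = true <;>
      simp at hq <;> cases inq <;>
      simp [pvStepA, pvAGo, pvAltIsQ, pvAltDrop5, hq, ih]

lemma pvAGo_true (ls : List String) :
    pvAGo ls true
      = (ls.takeWhile pvAltIsQ).map pvAltDrop5
        ++ "</blockquote>" :: pvAGo (ls.dropWhile pvAltIsQ) false := by
  induction ls with
  | nil => simp [pvAGo]
  | cons l ls ih =>
    by_cases hq : pvAltIsQ l = true <;>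
      simp [pvAGo, hq, ih]

lemma pvAGo_false (ls : List String) : pvAGo ls false = pvAltGo ls := by
  induction ls using pvAltGo.induct with
  | case1 => simp [pvAGo, pvAltGo]
  | case2 l rest hq ih =>
    rw [pvAltGo]
    simp only [List.dropWhile_cons, hq, if_true] at ih
    simp [pvAGo, hq, pvAGo_true, ih]
  | case3 l rest hq ih =>
    simp [pvAGo, pvAltGo, hq, ih]

-- ===== VERDICT (by name: the statement is the Claim_ definition above) =====
theorem convert_blockquotes_py_spec : Claim_equal_convert_blockquotes_py := by
  intro text _
  unfold Spec_convert_blockquotes_py convert_blockquotes_py convert_blockquotes_py_alt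
  simp only [pvFoldlA, pvAGo_false, List.nil_append]
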